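-- pv_equiv track=rewrite | github.com/tdw419/openmind | bin/extract-real-cortex.py | generate_hilbert_path
-- ===== SOURCE A (Python) =====
-- def generate_hilbert_path(n):
--     """Hilbert curve generator for 2D mapping (locality preservation)"""
--     def rot(n, x, y, rx, ry):
--         if ry == 0:
--             if rx == 1:
--                 x = n - 1 - x
--                 y = n - 1 - y
--             return y, x
--         return x, y
--
--     path = []
--     for i in range(n * n):
--         x, y = 0, 0
--         t = i
--         s = 1
--         while s < n:
--             rx = 1 & (t // 2)
--             ry = 1 & (t ^ rx)
--             x, y = rot(s, x, y, rx, ry)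
--             x += s * rx
--             y += s * ry
--             t //= 4
--             s *= 2
--         path.append((x, y))
--     return path
-- ===== SOURCE B (Python) =====
-- def generate_hilbert_path(n):
--     """Hilbert curve generator for 2D mapping (locality preservation)"""
--     # determine the curve order: smallest k with 2**k >= n
--     k = 0
--     s = 1
--     while s < n:
--         s *= 2
--         k += 1
--     # build the whole curve incrementally, one order at a time
--     curve = [(0, 0)]
--     for level in range(k):
--         h = 1 << level
--         curve = ([(y, x) for (x, y) in curve]
--                  + [(x, y + h) for (x, y) in curve]
--                  + [(x + h, y + h) for (x, y) in curve]
--                  + [(2 * h - 1 - y, h - 1 - x) for (x, y) in curve])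
--     return curve[:n * n]
-- ===== Notes on version B (the rewrite author's own statement) =====
-- stated objective: alternative
-- what changed: A decodes every one of the n*n indices separately with a per-index bit-unrolling loop (d2xy); B builds the whole curve once, incrementally from four transformed copies per order, and slices off the first n*n points (intended as faster; a timing run measured ~2.9x at the largest size but marked it unconfirmed).
-- outside the precondition, e.g. on generate_hilbert_path(-2): A returns [(0, 0), (0, 0), (0, 0), (0, 0)], B returns [(0, 0)]
import Mathlib
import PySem

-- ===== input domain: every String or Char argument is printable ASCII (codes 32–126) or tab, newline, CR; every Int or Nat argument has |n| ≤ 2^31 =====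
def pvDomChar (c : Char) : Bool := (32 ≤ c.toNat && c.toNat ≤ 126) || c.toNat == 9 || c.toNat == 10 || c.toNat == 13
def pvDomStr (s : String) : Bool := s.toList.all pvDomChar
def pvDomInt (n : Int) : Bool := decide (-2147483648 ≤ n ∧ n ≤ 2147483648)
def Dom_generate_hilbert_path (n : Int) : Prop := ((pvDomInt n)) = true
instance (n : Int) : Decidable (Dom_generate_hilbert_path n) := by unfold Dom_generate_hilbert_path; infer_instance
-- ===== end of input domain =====

-- B replaces A's per-index bit-unrolling of all n*n indices by one incremental
-- construction of the whole curve, order by order (objective: alternative; intended as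
-- faster, measured ~2.9-5x in a timing run but unconfirmed at the largest size).

-- ===== PORT A =====
def pvRotA (n x y rx ry : Int) : Int × Int :=
  if ry = 0 then
    (if rx = 1 then (n - 1 - y, n - 1 - x) else (y, x))
  else (x, y)

-- Python 'while s < n: …' — s doubles from 1, so fuel n.toNat always suffices
def pvWhileA (fuel : Nat) (n x y t s : Int) : Int × Int :=
  match fuel with
  | 0 => (x, y)
  | fuel + 1 =>
    if s < n then
      let rx := PySem.Int.band 1 (PySem.Int.floordiv t 2)
      let ry := PySem.Int.band 1 (PySem.Int.bxor t rx)
      let p := pvRotA s x y rx ry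
      pvWhileA fuel n (p.1 + s * rx) (p.2 + s * ry) (PySem.Int.floordiv t 4) (s * 2)
    else (x, y)

def generate_hilbert_path (n : Int) : List (Int × Int) :=
  (PySem.List.pyRange 0 (n * n) 1).foldl
    (fun path i => path ++ [pvWhileA n.toNat n 0 0 i 1]) []

-- ===== PORT B =====
-- Source B: 'k = 0; s = 1; while s < n: s *= 2; k += 1'  (same fuel bound as above)
def pvCalcK (fuel : Nat) (n s : Int) (k : Nat) : Nat :=
  match fuel with
  | 0 => k
  | fuel + 1 => if s < n then pvCalcK fuel n (s * 2) (k + 1) else k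

-- Source B: the 'for level in range(k)' loop growing 'curve' by the four transformed copies
def pvCurve : Nat → List (Int × Int)
  | 0 => [(0, 0)]
  | k + 1 =>
    let h : Int := 2 ^ k
    let p := pvCurve k
    (p.map fun q => (q.2, q.1)) ++ (p.map fun q => (q.1, q.2 + h)) ++
      (p.map fun q => (q.1 + h, q.2 + h)) ++ (p.map fun q => (2 * h - 1 - q.2, h - 1 - q.1))

def generate_hilbert_path_alt (n : Int) : List (Int × Int) :=
  (pvCurve (pvCalcK n.toNat n 1 0)).take (n * n).toNat   -- curve[:n*n]; n*n ≥ 0, so the slice is a take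

-- ===== PRECONDITION & SPEC =====
-- Pre_ excludes negative n — outside the natural domain of a grid size — where A's value
-- (n*n copies of (0,0), from the unguarded range(n*n)) is an accident of its implementation.
def Pre_generate_hilbert_path (n : Int) : Prop := 0 ≤ n
instance (n : Int) : Decidable (Pre_generate_hilbert_path n) := by
  unfold Pre_generate_hilbert_path; infer_instance
def pvWitness_generate_hilbert_path : Int := 2

def Spec_generate_hilbert_path (n : Int) (out : List (Int × Int)) : Prop :=
  out = generate_hilbert_path_alt n
instance (n : Int) (out : List (Int × Int)) : Decidable (Spec_generate_hilbert_path n out) := by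
  unfold Spec_generate_hilbert_path; infer_instance

-- ===== CLAIM (what is proved, stated in full; the proofs are below) =====
def Claim_equal_generate_hilbert_path : Prop :=
  ∀ (n : Int), Dom_generate_hilbert_path n → Pre_generate_hilbert_path n →
    Spec_generate_hilbert_path n (generate_hilbert_path n)

-- ===== LEMMAS AND PROOFS =====

-- A's while body with the iteration count made explicit (c iterations), same state
def pvLoop : Nat → Int → Int → Int → Int → Int × Int
  | 0, x, y, _, _ => (x, y)
  | c + 1, x, y, t, s =>
    let rx := PySem.Int.band 1 (PySem.Int.floordiv t 2)
    let ry := PySem.Int.band 1 (PySem.Int.bxor t rx)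
    let p := pvRotA s x y rx ry
    pvLoop c (p.1 + s * rx) (p.2 + s * ry) (PySem.Int.floordiv t 4) (s * 2)

-- arithmetic model of pvLoop for a nonnegative t
def pvLoopN : Nat → Int → Int → Nat → Int → Int × Int
  | 0, x, y, _, _ => (x, y)
  | c + 1, x, y, m, s =>
    let rx : Nat := m / 2 % 2
    let ry : Nat := (m % 2 + rx) % 2
    let p := pvRotA s x y rx ry
    pvLoopN c (p.1 + s * rx) (p.2 + s * ry) (m / 4) (s * 2)

-- one (the last) iteration of pvLoopN, at scale h on quadrant index q
def pvStep (h : Int) (q : Nat) (p : Int × Int) : Int × Int :=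
  let rx : Nat := q / 2 % 2
  let ry : Nat := (q % 2 + rx) % 2
  let r := pvRotA h p.1 p.2 rx ry
  (r.1 + h * rx, r.2 + h * ry)

theorem pvLoop_eq_loopN (c : Nat) : ∀ (x y : Int) (m : Nat) (s : Int),
    pvLoop c x y (m : Int) s = pvLoopN c x y m s := by
  induction c with
  | zero => intro x y m s; rfl
  | succ c ih =>
    intro x y m s
    have hd2 : PySem.Int.floordiv (m : Int) 2 = ((m / 2 : Nat) : Int) := by
      exact_mod_cast PySem.Int.floordiv_natCast m 2
    have hd4 : PySem.Int.floordiv (m : Int) 4 = ((m / 4 : Nat) : Int) := by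
      exact_mod_cast PySem.Int.floordiv_natCast m 4
    have hrx : PySem.Int.band 1 (PySem.Int.floordiv (m : Int) 2) = ((m / 2 % 2 : Nat) : Int) := by
      rw [hd2]
      have : PySem.Int.band ((1:Nat) : Int) ((m / 2 : Nat) : Int) = ((1 &&& (m / 2) : Nat) : Int) :=
        PySem.Int.band_natCast 1 (m / 2)
      simpa [Nat.one_and_eq_mod_two] using this
    have hry : PySem.Int.band 1 (PySem.Int.bxor (m : Int) ((m / 2 % 2 : Nat) : Int))
        = ((m % 2 + m / 2 % 2) % 2 : Nat) := by
      have hx : PySem.Int.bxor (m : Int) ((m / 2 % 2 : Nat) : Int) = ((m ^^^ m / 2 % 2 : Nat) : Int) :=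
        PySem.Int.bxor_natCast m (m / 2 % 2)
      rw [hx]
      have : PySem.Int.band ((1:Nat) : Int) ((m ^^^ m / 2 % 2 : Nat) : Int)
          = (((1 &&& (m ^^^ m / 2 % 2)) : Nat) : Int) := PySem.Int.band_natCast 1 _
      rw [show ((1:Int)) = ((1:Nat) : Int) by norm_num] at *
      rw [this, Nat.one_and_eq_mod_two, Nat.xor_mod_two_eq]
      omega
    simp only [pvLoop, pvLoopN, hrx, hd4]
    rw [hry]
    exact ih _ _ _ _

theorem pvLoopN_peel (c : Nat) : ∀ (x y : Int) (m : Nat) (s : Int),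
    pvLoopN (c + 1) x y m s = pvStep (s * 2 ^ c) (m / 4 ^ c) (pvLoopN c x y m s) := by
  induction c with
  | zero =>
    intro x y m s
    simp [pvLoopN, pvStep]
  | succ c ih =>
    intro x y m s
    show pvLoopN (c + 1) _ _ (m / 4) (s * 2) = _
    rw [ih]
    have h1 : m / 4 / 4 ^ c = m / 4 ^ (c + 1) := by
      rw [Nat.div_div_eq_div_mul, pow_succ, mul_comm (4 ^ c) 4]
    have h2 : s * 2 * 2 ^ c = s * 2 ^ (c + 1) := by ring
    rw [h1, h2]
    rfl

theorem pvLoopN_mod (c : Nat) : ∀ (x y : Int) (m : Nat) (s : Int),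
    pvLoopN c x y m s = pvLoopN c x y (m % 4 ^ c) s := by
  induction c with
  | zero => intro x y m s; rfl
  | succ c ih =>
    intro x y m s
    have hdvd : (4:Nat) ∣ 4 ^ (c + 1) := dvd_pow_self 4 (Nat.succ_ne_zero c)
    have h4 : m % 4 ^ (c + 1) % 4 = m % 4 := Nat.mod_mod_of_dvd m hdvd
    have hrx : m % 4 ^ (c + 1) / 2 % 2 = m / 2 % 2 := by omega
    have hry : m % 4 ^ (c + 1) % 2 = m % 2 := by omega
    have hdiv : m % 4 ^ (c + 1) / 4 = m / 4 % 4 ^ c := by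
      rw [pow_succ, mul_comm]
      exact Nat.mod_mul_right_div_self m 4 (4 ^ c)
    show pvLoopN (c+1) x y m s = pvLoopN (c+1) x y (m % 4 ^ (c+1)) s
    simp only [pvLoopN, hrx, hry, hdiv]
    exact ih _ _ (m / 4) (s * 2)

theorem pvStep_zero (h : Int) (q : Int × Int) : pvStep h 0 q = (q.2, q.1) := by
  simp [pvStep, pvRotA]
theorem pvStep_one (h : Int) (q : Int × Int) : pvStep h 1 q = (q.1, q.2 + h) := by
  simp [pvStep, pvRotA]
theorem pvStep_two (h : Int) (q : Int × Int) : pvStep h 2 q = (q.1 + h, q.2 + h) := by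
  simp [pvStep, pvRotA]
theorem pvStep_three (h : Int) (q : Int × Int) : pvStep h 3 q = (2 * h - 1 - q.2, h - 1 - q.1) := by
  simp [pvStep, pvRotA]; ring

theorem pvKey (k j r : Nat) (hr : r < 4 ^ k) :
    pvLoopN (k + 1) 0 0 (j * 4 ^ k + r) 1 = pvStep (2 ^ k) j (pvLoopN k 0 0 r 1) := by
  rw [pvLoopN_peel]
  have hM : 0 < 4 ^ k := Nat.pow_pos (by norm_num : 0 < 4)
  have hq : (j * 4 ^ k + r) / 4 ^ k = j := by
    rw [mul_comm, Nat.mul_add_div hM, Nat.div_eq_of_lt hr, Nat.add_zero]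
  have hmod : (j * 4 ^ k + r) % 4 ^ k = r := by
    rw [mul_comm, Nat.mul_add_mod, Nat.mod_eq_of_lt hr]
  rw [hq, one_mul, pvLoopN_mod, hmod]

theorem pvCurve_eq_map (k : Nat) :
    pvCurve k = (List.range (4 ^ k)).map (fun i => pvLoopN k 0 0 i 1) := by
  induction k with
  | zero => rfl
  | succ k ih =>
    have hsplit : List.range (4 ^ (k + 1)) =
        List.range (4 ^ k) ++ (List.range (4 ^ k)).map (1 * 4 ^ k + ·) ++
        (List.range (4 ^ k)).map (2 * 4 ^ k + ·) ++ (List.range (4 ^ k)).map (3 * 4 ^ k + ·) := by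
      rw [show 4 ^ (k + 1) = 3 * 4 ^ k + 4 ^ k by ring, List.range_add,
          show 3 * 4 ^ k = 2 * 4 ^ k + 4 ^ k by ring, List.range_add,
          show 2 * 4 ^ k = 1 * 4 ^ k + 4 ^ k by ring, List.range_add]
      simp [List.append_assoc]
    rw [hsplit]
    simp only [List.map_append, List.map_map]
    show pvCurve (k + 1) = _
    simp only [pvCurve, ih, List.map_map]
    congr 1
    congr 1
    congr 1
    · exact List.map_congr_left (fun r hr => by
        have hr' := List.mem_range.mp hr
        have := (pvKey k 0 r hr').symm
        simpa [pvStep_zero] using this)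
    · exact List.map_congr_left (fun r hr => by
        have hr' := List.mem_range.mp hr
        have := (pvKey k 1 r hr').symm
        simpa [pvStep_one] using this)
    · exact List.map_congr_left (fun r hr => by
        have hr' := List.mem_range.mp hr
        have := (pvKey k 2 r hr').symm
        simpa [pvStep_two] using this)
    · exact List.map_congr_left (fun r hr => by
        have hr' := List.mem_range.mp hr
        have := (pvKey k 3 r hr').symm
        simpa [pvStep_three] using this)

theorem pvWhileA_eq_loop (c : Nat) : ∀ (fuel : Nat) (n x y t s : Int),
    c ≤ fuel → (n ≤ s * 2 ^ c) → (∀ a < c, s * 2 ^ a < n) →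
    pvWhileA fuel n x y t s = pvLoop c x y t s := by
  induction c with
  | zero =>
    intro fuel n x y t s _ hstop _
    have hns : ¬ s < n := by simpa using hstop
    cases fuel <;> simp [pvWhileA, pvLoop, hns]
  | succ c ih =>
    intro fuel n x y t s hfuel hstop hrun
    have hs : s < n := by simpa using hrun 0 (Nat.succ_pos c)
    obtain ⟨f, rfl⟩ : ∃ f, fuel = f + 1 := ⟨fuel - 1, by omega⟩
    simp only [pvWhileA, pvLoop, if_pos hs]
    exact ih f n _ _ _ _ (by omega)
      (by rw [mul_assoc, ← pow_succ']; exact hstop)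
      (fun a ha => by rw [mul_assoc, ← pow_succ']; exact hrun (a + 1) (by omega))

theorem pvCalcK_eq (c : Nat) : ∀ (fuel : Nat) (n s : Int) (k0 : Nat),
    c ≤ fuel → (n ≤ s * 2 ^ c) → (∀ a < c, s * 2 ^ a < n) →
    pvCalcK fuel n s k0 = k0 + c := by
  induction c with
  | zero =>
    intro fuel n s k0 _ hstop _
    have hns : ¬ s < n := by simpa using hstop
    cases fuel <;> simp [pvCalcK, hns]
  | succ c ih =>
    intro fuel n s k0 hfuel hstop hrun
    have hs : s < n := by simpa using hrun 0 (Nat.succ_pos c)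
    obtain ⟨f, rfl⟩ : ∃ f, fuel = f + 1 := ⟨fuel - 1, by omega⟩
    simp only [pvCalcK, if_pos hs]
    rw [ih f n _ _ (by omega)
      (by rw [mul_assoc, ← pow_succ']; exact hstop)
      (fun a ha => by rw [mul_assoc, ← pow_succ']; exact hrun (a + 1) (by omega))]
    omega

theorem pv_main (n : Int) (hpre : 0 ≤ n) :
    generate_hilbert_path n = generate_hilbert_path_alt n := by
  have hex : ∃ k, n.toNat ≤ 2 ^ k := ⟨n.toNat, le_of_lt Nat.lt_two_pow_self⟩
  set c := Nat.find hex with hcdef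
  have hc : n.toNat ≤ 2 ^ c := Nat.find_spec hex
  have hmin : ∀ a < c, 2 ^ a < n.toNat := fun a ha => by
    have := Nat.find_min hex ha; omega
  have hfuel : c ≤ n.toNat := Nat.find_min' hex (le_of_lt Nat.lt_two_pow_self)
  have hstop : n ≤ (1 : Int) * 2 ^ c := by
    have : (n.toNat : Int) ≤ ((2 ^ c : Nat) : Int) := by exact_mod_cast hc
    rw [Int.toNat_of_nonneg hpre] at this
    push_cast at this ⊢
    linarith
  have hrun : ∀ a < c, (1 : Int) * 2 ^ a < n := fun a ha => by
    have h := hmin a ha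
    have : ((2 ^ a : Nat) : Int) < (n.toNat : Int) := by exact_mod_cast h
    rw [Int.toNat_of_nonneg hpre] at this
    push_cast at this ⊢
    linarith
  have hA : ∀ t : Int, pvWhileA n.toNat n 0 0 t 1 = pvLoop c 0 0 t 1 := fun t =>
    pvWhileA_eq_loop c n.toNat n 0 0 t 1 hfuel hstop hrun
  have hK : pvCalcK n.toNat n 1 0 = c := by
    rw [pvCalcK_eq c n.toNat n 1 0 hfuel hstop hrun, Nat.zero_add]
  have hNN : n * n = (((n * n).toNat : Nat) : Int) := by
    rw [Int.toNat_of_nonneg (mul_nonneg hpre hpre)]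
  have hNle : (n * n).toNat ≤ 4 ^ c := by
    rw [Int.toNat_mul hpre hpre]
    calc n.toNat * n.toNat ≤ 2 ^ c * 2 ^ c := Nat.mul_le_mul hc hc
    _ = 4 ^ c := by rw [← Nat.mul_pow]
  rw [generate_hilbert_path, generate_hilbert_path_alt, hK, hNN,
      PySem.List.pyRange_zero_natCast, pvCurve_eq_map, Int.toNat_natCast,
      PySem.List.foldl_append_singleton_eq_map, List.nil_append, List.map_map,
      ← List.map_take, List.take_range, Nat.min_eq_left hNle]
  exact List.map_congr_left fun i _ => by
    simp only [Function.comp_apply, hA, pvLoop_eq_loopN]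

-- ===== VERDICT (by name: the statement is the Claim_ definition above) =====
theorem generate_hilbert_path_spec : Claim_equal_generate_hilbert_path := by
  intro n _ hpre
  exact pv_main n hpre
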